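-- pv_equiv track=rewrite | github.com/darevalog/Proyecto-MD1 | main_MD1.py | o_y_Logico
-- ===== SOURCE A (Python) =====
-- def devolverS(d:list):
--    a=""
--    for i in range(len(d)):
--      if i==len(d)-1:
--        a=a+d[i]
--      else:
--       a=a+d[i]+" "
--    return (a)
--
-- def o_y_Logico(formula:list):
--   termino = []
--   i = 0
--   while i < len(formula):
--     if formula[i] == "\\lor" or formula[i] == "\\land":
--       termino.append('(')
--       termino.append(formula[i-1])
--       termino.append(formula[i])
--       termino.append(formula[i+1])
--       termino.append(')')
--       formula.pop(i+1)
--       formula.pop(i)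
--       formula.pop(i-1)
--       formula.insert(i-1, devolverS(termino))
--       i = i - 1
--       termino.clear()
--     i = i + 1
--   return formula
-- ===== SOURCE B (Python) =====
-- def o_y_Logico(formula: list):
--     # Single left-to-right pass with an output stack; mutates formula in place
--     # (like A) so the returned list is the argument object with the same content.
--     out = []
--     i = 0
--     n = len(formula)
--     while i < n:
--         t = formula[i]
--         if t == "\\lor" or t == "\\land":
--             prev = out.pop()
--             out.append("( " + prev + " " + t + " " + formula[i + 1] + " )")
--             i += 2
--         else:
--             out.append(t)
--             i += 1
--     formula[:] = out
--     return formula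
-- ===== Notes on version B (the rewrite author's own statement) =====
-- stated objective: alternative
-- what changed: Replaced the rescanning while-loop that pops three elements out of the middle of the list and re-inserts a combined string by a single left-to-right pass that keeps an output stack: an operator token pops its left operand off the stack and pushes the parenthesized combination, so no mid-list mutation or rescanning remains.
-- outside the precondition, e.g. on o_y_Logico(['\\lor', 'x', 'y']): A returns ['( y \\lor x )'], B raises IndexError
import Mathlib
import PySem

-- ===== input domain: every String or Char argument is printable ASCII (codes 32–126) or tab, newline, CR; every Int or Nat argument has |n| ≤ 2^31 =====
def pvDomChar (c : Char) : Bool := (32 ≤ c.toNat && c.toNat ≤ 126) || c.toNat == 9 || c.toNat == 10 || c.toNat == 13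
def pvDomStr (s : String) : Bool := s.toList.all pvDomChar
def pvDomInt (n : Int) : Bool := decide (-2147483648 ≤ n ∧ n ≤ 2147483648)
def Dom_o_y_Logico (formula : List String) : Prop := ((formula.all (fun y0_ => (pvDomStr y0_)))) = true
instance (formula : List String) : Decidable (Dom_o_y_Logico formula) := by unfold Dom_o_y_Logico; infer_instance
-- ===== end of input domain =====

-- B replaces A's pop/insert-in-the-middle rescanning loop by an alternative
-- algorithm: a single left-to-right pass with an output stack. Both Pythons mutate
-- `formula` in place to the returned content; the equivalence is about the return value.

-- ===== PORT A =====
-- helper devolverS: joins the list with single spaces (literal port of its index loop)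
def devolverS (d : List String) : String :=
  (List.range d.length).foldl
    (fun a i =>
      if i == d.length - 1 then a ++ PySem.List.pyGetD d (i : Int) ""
      else a ++ PySem.List.pyGetD d (i : Int) "" ++ " ") ""

-- A's while loop over the mutating list `formula` and index `i`, written as
-- structural recursion on a fuel bound that strictly exceeds the iteration count
-- (each iteration either raises `i` or shortens the list; within Pre_ the fuel is
-- never exhausted — that is a by-product of `loop_eq_go` below).
-- (every `none` branch is a Python IndexError: A raises there, outside Pre_)
def o_y_LogicoLoop : Nat → List String → Int → List String
  | 0, formula, _ => formula
  | fuel + 1, formula, i =>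
    if i < (formula.length : Int) then
      match PySem.List.pyGet? formula i with
      | none => formula
      | some fi =>
        if fi == "\\lor" || fi == "\\land" then
          match PySem.List.pyGet? formula (i - 1), PySem.List.pyGet? formula (i + 1) with
          | some fprev, some fnext =>
            match PySem.List.pop? formula (i + 1) with
            | none => formula
            | some (_, f1) =>
              match PySem.List.pop? f1 i with
              | none => f1
              | some (_, f2) =>
                match PySem.List.pop? f2 (i - 1) with
                | none => f2
                | some (_, f3) =>
                  o_y_LogicoLoop fuel
                    (PySem.List.insert f3 (i - 1) (devolverS ["(", fprev, fi, fnext, ")"]))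
                    (i - 1 + 1)
          | _, _ => formula
        else o_y_LogicoLoop fuel formula (i + 1)
    else formula

def o_y_Logico (formula : List String) : List String :=
  o_y_LogicoLoop (3 * formula.length + 1) formula 0

-- ===== PORT B =====
-- the operator test B's Python writes as `t == "\\lor" or t == "\\land"`
def isOp (t : String) : Bool := t == "\\lor" || t == "\\land"

-- the output stack `out` is Python's `out` list in REVERSE order
-- (Python `out.append` = cons, `out.pop()` = head); `rest` = formula[i:].
-- The `_, _` branch is where Python B raises IndexError (outside Pre_).
def o_y_LogicoGo (out : List String) (rest : List String) : List String :=
  match rest with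
  | [] => out.reverse
  | t :: r =>
    if isOp t then
      match out, r with
      | prev :: out', nxt :: r' =>
          o_y_LogicoGo (("( " ++ prev ++ " " ++ t ++ " " ++ nxt ++ " )") :: out') r'
      | _, _ => out.reverse
    else o_y_LogicoGo (t :: out) r

def o_y_Logico_alt (formula : List String) : List String := o_y_LogicoGo [] formula

-- ===== PRECONDITION & SPEC =====
-- Pre_ excludes formulas whose FIRST or LAST token is an operator: with an operator
-- last (or first on a short list) A raises IndexError, and with an operator first on a
-- longer list A returns a negative-index wraparound value while B raises IndexError.
def Pre_o_y_Logico (formula : List String) : Prop :=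
  (formula.head?.all (fun t => !isOp t)) = true ∧
  (formula.getLast?.all (fun t => !isOp t)) = true
instance (formula : List String) : Decidable (Pre_o_y_Logico formula) := by
  unfold Pre_o_y_Logico; infer_instance

def pvWitness_o_y_Logico : List String := ["p", "\\lor", "q"]

def Spec_o_y_Logico (formula : List String) (out : List String) : Prop := out = o_y_Logico_alt formula
instance (formula : List String) (out : List String) : Decidable (Spec_o_y_Logico formula out) := by unfold Spec_o_y_Logico; infer_instance

-- ===== CLAIM (what is proved, stated in full; the proofs are below) =====
def Claim_equal_o_y_Logico : Prop := ∀ (formula : List String), Dom_o_y_Logico formula → Pre_o_y_Logico formula → Spec_o_y_Logico formula (o_y_Logico formula)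

-- ===== LEMMAS AND PROOFS =====

-- devolverS on A's five-element `termino` is exactly B's concatenation
lemma devolverS_five (p o n : String) :
    devolverS ["(", p, o, n, ")"] = "( " ++ p ++ " " ++ o ++ " " ++ n ++ " )" := by
  simp [devolverS, List.range_succ, PySem.List.pyGetD, PySem.List.pyGet?, PySem.List.pyIdx?]
  simp [String.ext_iff]

-- a combined "( ... )" string is never an operator token
lemma combine_not_op (p o n : String) :
    isOp ("( " ++ p ++ " " ++ o ++ " " ++ n ++ " )") = false := by
  simp [isOp, String.ext_iff]

-- Python pop at the junction of an append
lemma pop?_append_length {alpha : Type} (pre suf : List alpha) (y : alpha) :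
    PySem.List.pop? (pre ++ y :: suf) (pre.length : Int) = some (y, pre ++ suf) := by
  rw [PySem.List.pop?_natCast _ _ (by simp)]
  congr 1
  refine Prod.ext ?_ ?_
  · simp
  · simp [List.eraseIdx_append_of_length_le (le_refl pre.length)]

-- one step of B's pass, in the two shapes the simulation needs
lemma go_cons_nonop (out : List String) (t : String) (r : List String) (h : isOp t = false) :
    o_y_LogicoGo out (t :: r) = o_y_LogicoGo (t :: out) r := by
  rw [o_y_LogicoGo.eq_def]
  dsimp only
  rw [if_neg (by simp [h])]

-- main simulation: A's loop at state formula = done ++ rest, i = |done|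
-- equals B's stack pass on (done.reverse, rest), given the two invariants.
lemma loop_eq_go : forall (fuel : Nat) (rest done : List String), rest.length < fuel ->
    (done = [] -> (rest.head?.all (fun t => !isOp t)) = true) ->
    (((done ++ rest).getLast?.all (fun t => !isOp t)) = true) ->
    o_y_LogicoLoop fuel (done ++ rest) (done.length : Int) = o_y_LogicoGo done.reverse rest := by
  intro fuel
  induction fuel with
  | zero =>
    intro rest done hlen _ _
    exact absurd hlen (Nat.not_lt_zero _)
  | succ n ih =>
    intro rest done hlen hI1 hI2
    cases rest with
    | nil => rw [o_y_LogicoLoop, o_y_LogicoGo]; simp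
    | cons t r =>
      by_cases hop : isOp t = true
      · -- operator token
        have hdne : done ≠ [] := by
          intro h; have := hI1 h; simp [hop] at this
        obtain ⟨d0, prev, rfl⟩ : ∃ d0 p, done = d0 ++ [p] := by
          rcases List.eq_nil_or_concat done with h | ⟨d0, p, h⟩
          · exact absurd h hdne
          · exact ⟨d0, p, by simpa [List.concat_eq_append] using h⟩
        cases r with
        | nil => exfalso; simp [List.getLast?_append, hop] at hI2
        | cons nxt r' =>
          have hcond : ((d0 ++ [prev]).length : Int) < (((d0 ++ [prev]) ++ t :: nxt :: r').length : Int) := by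
            simp
            omega
          have gt' : PySem.List.pyGet? ((d0 ++ [prev]) ++ t :: nxt :: r') ((d0 ++ [prev]).length : Int) = some t :=
            PySem.List.pyGet?_append_length _ _ _
          have gprev : PySem.List.pyGet? ((d0 ++ [prev]) ++ t :: nxt :: r') (((d0 ++ [prev]).length : Int) - 1) = some prev := by
            rw [show (((d0 ++ [prev]).length : Int) - 1) = (d0.length : Int) from by simp; try omega,
                show (d0 ++ [prev]) ++ t :: nxt :: r' = d0 ++ prev :: (t :: nxt :: r') from by simp; try omega]
            exact PySem.List.pyGet?_append_length _ _ _
          have gnext : PySem.List.pyGet? ((d0 ++ [prev]) ++ t :: nxt :: r') (((d0 ++ [prev]).length : Int) + 1) = some nxt := by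
            rw [show (d0 ++ [prev]) ++ t :: nxt :: r' = (d0 ++ [prev, t]) ++ nxt :: r' from by simp; try omega,
                show (((d0 ++ [prev]).length : Int) + 1) = ((d0 ++ [prev, t]).length : Int) from by simp; try omega]
            exact PySem.List.pyGet?_append_length _ _ _
          have p1 : PySem.List.pop? ((d0 ++ [prev]) ++ t :: nxt :: r') (((d0 ++ [prev]).length : Int) + 1)
              = some (nxt, (d0 ++ [prev]) ++ t :: r') := by
            rw [show (d0 ++ [prev]) ++ t :: nxt :: r' = (d0 ++ [prev, t]) ++ nxt :: r' from by simp; try omega,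
                show (((d0 ++ [prev]).length : Int) + 1) = ((d0 ++ [prev, t]).length : Int) from by simp; try omega]
            rw [pop?_append_length]
            simp
          have p2 : PySem.List.pop? ((d0 ++ [prev]) ++ t :: r') ((d0 ++ [prev]).length : Int)
              = some (t, (d0 ++ [prev]) ++ r') :=
            pop?_append_length _ _ _
          have p3 : PySem.List.pop? ((d0 ++ [prev]) ++ r') (((d0 ++ [prev]).length : Int) - 1)
              = some (prev, d0 ++ r') := by
            rw [show (((d0 ++ [prev]).length : Int) - 1) = (d0.length : Int) from by simp; try omega,
                show (d0 ++ [prev]) ++ r' = d0 ++ prev :: r' from by simp; try omega]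
            exact pop?_append_length _ _ _
          have ins : PySem.List.insert (d0 ++ r') (((d0 ++ [prev]).length : Int) - 1)
                (devolverS ["(", prev, t, nxt, ")"])
              = d0 ++ devolverS ["(", prev, t, nxt, ")"] :: r' := by
            rw [show (((d0 ++ [prev]).length : Int) - 1) = (d0.length : Int) from by simp; try omega]
            rw [PySem.List.insert_natCast _ _ _ (by simp)]
            rw [List.take_left, List.drop_left]
          have hgo : o_y_LogicoGo (d0 ++ [prev]).reverse (t :: nxt :: r')
              = o_y_LogicoGo (d0 ++ [devolverS ["(", prev, t, nxt, ")"]]).reverse r' := by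
            rw [show (d0 ++ [prev]).reverse = prev :: d0.reverse from by simp,
                show (d0 ++ [devolverS ["(", prev, t, nxt, ")"]]).reverse
                      = devolverS ["(", prev, t, nxt, ")"] :: d0.reverse from by simp,
                devolverS_five]
            rw [o_y_LogicoGo, if_pos hop]
          rw [o_y_LogicoLoop, if_pos hcond, hgo]
          split
          · next heq => rw [gt'] at heq; simp at heq
          · next fi heq =>
            rw [gt'] at heq
            injection heq with hfi
            subst hfi
            rw [if_pos (show (t == "\\lor" || t == "\\land") = true from hop)]
            split
            · next fprev fnext heq1 heq2 =>
              rw [gprev] at heq1; injection heq1 with e1; subst e1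
              rw [gnext] at heq2; injection heq2 with e2; subst e2
              split
              · next heq3 => rw [p1] at heq3; simp at heq3
              · next v1 f1 heq3 =>
                rw [p1] at heq3
                injection heq3 with hp; injection hp with hv1 hf1
                subst hf1
                split
                · next heq4 => rw [p2] at heq4; simp at heq4
                · next v2 f2 heq4 =>
                  rw [p2] at heq4
                  injection heq4 with hp2; injection hp2 with hv2 hf2
                  subst hf2
                  split
                  · next heq5 => rw [p3] at heq5; simp at heq5
                  · next v3 f3 heq5 =>
                    rw [p3] at heq5
                    injection heq5 with hp3; injection hp3 with hv3 hf3
                    subst hf3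
                    rw [ins]
                    rw [show d0 ++ devolverS ["(", prev, t, nxt, ")"] :: r'
                          = (d0 ++ [devolverS ["(", prev, t, nxt, ")"]]) ++ r' from by simp; try omega,
                        show (((d0 ++ [prev]).length : Int) - 1 + 1)
                          = ((d0 ++ [devolverS ["(", prev, t, nxt, ")"]]).length : Int) from by simp; try omega]
                    apply ih
                    · simp at hlen ⊢; omega
                    · intro h; simp at h
                    · cases r' with
                      | nil =>
                        simp [List.getLast?_append, devolverS_five, combine_not_op]
                      | cons x xs =>
                        simp [List.getLast?_append] at hI2 ⊢
                        exact hI2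
            · next h => exact (h prev nxt gprev gnext).elim
      · -- ordinary token
        have hcond : ((done).length : Int) < ((done ++ t :: r).length : Int) := by simp
        have gt' : PySem.List.pyGet? (done ++ t :: r) ((done).length : Int) = some t :=
          PySem.List.pyGet?_append_length _ _ _
        have hgo : o_y_LogicoGo done.reverse (t :: r) = o_y_LogicoGo (done ++ [t]).reverse r := by
          rw [show (done ++ [t]).reverse = t :: done.reverse from by simp]
          exact go_cons_nonop _ _ _ (by simpa using hop)
        rw [o_y_LogicoLoop, if_pos hcond, hgo]
        split
        · next heq => rw [gt'] at heq; simp at heq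
        · next fi heq =>
          rw [gt'] at heq
          injection heq with hfi
          subst hfi
          rw [if_neg (show ¬(t == "\\lor" || t == "\\land") = true from by simpa [isOp] using hop)]
          rw [show done ++ t :: r = (done ++ [t]) ++ r from by simp; try omega,
              show ((done).length : Int) + 1 = ((done ++ [t]).length : Int) from by simp; try omega]
          apply ih
          · simp at hlen ⊢; omega
          · intro h; simp at h
          · rw [show (done ++ [t]) ++ r = done ++ t :: r from by simp; try omega]
            exact hI2

-- ===== VERDICT (by name: the statement is the Claim_ definition above) =====
theorem o_y_Logico_spec : Claim_equal_o_y_Logico := by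
  intro formula _ hpre
  unfold Spec_o_y_Logico o_y_Logico o_y_Logico_alt
  have := loop_eq_go (3 * formula.length + 1) formula [] (by omega)
    (fun _ => hpre.1) (by simpa using hpre.2)
  simpa using this
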